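-- pv_equiv track=rewrite | github.com/cegielskir/Quine-McCluskey-Algorithm | quineMcCluskey.py | stringToTokens
-- ===== SOURCE A (Python) =====
-- def stringToTokens(string):
--     tokens =[]
--     newToken = ""
--     wasLastChar = False
--     for char in string:
--
--         if char.isalpha():
--             if wasLastChar:
--                 newToken = newToken + char
--             else:
--                 tokens.append(newToken)
--                 newToken = char
--             wasLastChar = True
--         else:
--             tokens.append(newToken)
--             newToken = char
--             wasLastChar = False
--     tokens.append(newToken)
--     return tokens[1:]
-- ===== SOURCE B (Python) =====
-- def stringToTokens(string):
--     tokens = []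
--     i = 0
--     n = len(string)
--     while i < n:
--         if string[i].isalpha():
--             j = i + 1
--             while j < n and string[j].isalpha():
--                 j += 1
--             tokens.append(string[i:j])
--             i = j
--         else:
--             tokens.append(string[i])
--             i += 1
--     return tokens
-- ===== Notes on version B (the rewrite author's own statement) =====
-- stated objective: alternative
-- what changed: Replaced A's char-by-char accumulator with a wasLastChar flag and a leading-dummy-token [1:] trick by an index scanner that finds the end of each alphabetic run and slices it out as one token, appending non-alpha characters individually; no flag, no token accumulator, no trailing slice.
import Mathlib
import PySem

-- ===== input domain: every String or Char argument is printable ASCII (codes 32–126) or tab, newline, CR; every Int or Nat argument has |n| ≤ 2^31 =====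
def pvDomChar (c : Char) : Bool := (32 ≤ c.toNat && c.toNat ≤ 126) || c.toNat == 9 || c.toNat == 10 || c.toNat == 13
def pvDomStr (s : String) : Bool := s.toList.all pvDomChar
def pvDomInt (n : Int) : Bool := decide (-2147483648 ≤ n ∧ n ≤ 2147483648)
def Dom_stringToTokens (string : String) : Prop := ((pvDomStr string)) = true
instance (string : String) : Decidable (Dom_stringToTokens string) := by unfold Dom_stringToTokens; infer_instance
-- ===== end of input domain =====

-- B replaces A's flag/accumulator loop (with its leading-dummy [1:] trick) by an index
-- scanner that slices out each maximal alphabetic run and emits non-alpha chars singly.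

-- ===== PORT A =====
-- loop body of A's for-loop, as a named helper (state = (tokens, newToken, wasLastChar));
-- tokens kept as List (List Char), converted by String.mk at the end (exact: Python str
-- concatenation on code points = List Char append on the ASCII domain)
def pvStepA (st : List (List Char) × List Char × Bool) (char : Char) :
    List (List Char) × List Char × Bool :=
  match st with
  | (tokens, newToken, wasLastChar) =>
    if PySem.Chars.isalpha char then
      if wasLastChar then (tokens, newToken ++ [char], true)
      else (tokens ++ [newToken], [char], true)
    else (tokens ++ [newToken], [char], false)

def stringToTokens (string : String) : List String :=
  let fin := string.toList.foldl pvStepA ([], [], false)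
  -- tokens.append(newToken); return tokens[1:]   ([1:] on a nonneg index = drop 1, exact)
  ((fin.1 ++ [fin.2.1]).drop 1).map String.mk

-- ===== PORT B =====
-- Source B's outer while-loop as structural recursion on the remaining characters; the inner
-- 'while j < n and string[j].isalpha(): j += 1' + slice string[i:j] is takeWhile/dropWhile
def pvAltGo (cs : List Char) : List String :=
  match cs with
  | [] => []
  | c :: rest =>
    if PySem.Chars.isalpha c then
      String.mk (c :: rest.takeWhile PySem.Chars.isalpha) ::
        pvAltGo (rest.dropWhile PySem.Chars.isalpha)
    else
      String.mk [c] :: pvAltGo rest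
termination_by cs.length
decreasing_by
  · have := List.length_dropWhile_le (p := PySem.Chars.isalpha) (l := rest)
    simp; omega
  · simp

def stringToTokens_alt (string : String) : List String := pvAltGo string.toList

-- ===== PRECONDITION & SPEC =====
def Spec_stringToTokens (string : String) (out : List String) : Prop := out = stringToTokens_alt string
instance (string : String) (out : List String) : Decidable (Spec_stringToTokens string out) := by unfold Spec_stringToTokens; infer_instance

-- ===== CLAIM (what is proved, stated in full; the proofs are below) =====
def Claim_equal_stringToTokens : Prop := ∀ (string : String), Dom_stringToTokens string → Spec_stringToTokens string (stringToTokens string)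

-- ===== LEMMAS AND PROOFS =====

-- char-level version of pvAltGo (proof helper)
def pvRuns (cs : List Char) : List (List Char) :=
  match cs with
  | [] => []
  | c :: rest =>
    if PySem.Chars.isalpha c then
      (c :: rest.takeWhile PySem.Chars.isalpha) :: pvRuns (rest.dropWhile PySem.Chars.isalpha)
    else
      [c] :: pvRuns rest
termination_by cs.length
decreasing_by
  · have := List.length_dropWhile_le (p := PySem.Chars.isalpha) (l := rest)
    simp; omega
  · simp

theorem pvAltGo_eq_runs (cs : List Char) : pvAltGo cs = (pvRuns cs).map String.mk := by
  fun_induction pvAltGo cs with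
  | case1 => simp [pvRuns]
  | case2 c rest h ih =>
    rw [pvAltGo.eq_def, pvRuns.eq_def]
    simp only [h, if_true, List.map_cons]
    rw [← pvAltGo.eq_def (List.dropWhile PySem.Chars.isalpha rest), ih]
  | case3 c rest h ih =>
    rw [pvAltGo.eq_def, pvRuns.eq_def]
    simp only [h, if_false, Bool.false_eq_true, List.map_cons]
    rw [← pvAltGo.eq_def rest, ih]

theorem pvRuns_cons_alpha (c : Char) (rest : List Char) (h : PySem.Chars.isalpha c = true) :
    pvRuns (c :: rest) =
      (c :: rest.takeWhile PySem.Chars.isalpha) :: pvRuns (rest.dropWhile PySem.Chars.isalpha) := by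
  rw [pvRuns.eq_def]; simp [h]

theorem pvRuns_cons_nonalpha (c : Char) (rest : List Char) (h : PySem.Chars.isalpha c = false) :
    pvRuns (c :: rest) = [c] :: pvRuns rest := by
  rw [pvRuns.eq_def]; simp [h]

theorem pvFoldA_inv (cs : List Char) :
    ∀ (toks : List (List Char)) (cur : List Char) (flag : Bool),
      (cs.foldl pvStepA (toks, cur, flag)).1 ++ [(cs.foldl pvStepA (toks, cur, flag)).2.1] =
        toks ++ (if flag then
            (cur ++ cs.takeWhile PySem.Chars.isalpha) :: pvRuns (cs.dropWhile PySem.Chars.isalpha)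
          else cur :: pvRuns cs) := by
  induction cs with
  | nil =>
    intro toks cur flag
    cases flag <;> simp [pvRuns]
  | cons c rest ih =>
    intro toks cur flag
    by_cases h : PySem.Chars.isalpha c
    · cases flag
      · rw [List.foldl_cons, pvStepA]
        simp only [h, if_true, Bool.false_eq_true, if_false, ih]
        rw [pvRuns_cons_alpha c rest h]
        simp
      · rw [List.foldl_cons, pvStepA]
        simp only [h, if_true, ih]
        simp [h]
    · have h' : PySem.Chars.isalpha c = false := by simpa using h
      cases flag
      · rw [List.foldl_cons, pvStepA]
        simp only [h', ih]
        rw [pvRuns_cons_nonalpha c rest h']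
        simp
      · rw [List.foldl_cons, pvStepA]
        simp only [h', ih]
        simp [h', pvRuns_cons_nonalpha c rest h']

-- ===== VERDICT (by name: the statement is the Claim_ definition above) =====
theorem stringToTokens_spec : Claim_equal_stringToTokens := by
  intro s _
  unfold Spec_stringToTokens stringToTokens stringToTokens_alt
  rw [pvAltGo_eq_runs]
  have h := pvFoldA_inv s.toList [] [] false
  simp only [h]
  simp
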